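-- pv_equiv track=rewrite | github.com/fineman999/Algorithm | BaekJoon/Silver/Level1/tree_jump.py | solution
-- ===== SOURCE A (Python) =====
-- def solution(N, arr):
--     arr.sort()
--     visited = [0]*N
--     cnt = 0
--     for i in range(N):
--         if i%2==0:
--             visited[cnt] = arr[i]
--             cnt += 1
--         else:
--             visited[-cnt] = arr[i]
--     answer = abs(visited[0] - visited[-1])
--     for i in range(N-1):
--         answer = max(abs(visited[i] - visited[i+1]), answer)
--     return answer
-- ===== SOURCE B (Python) =====
-- def solution(N, arr):
--     arr.sort()
--     visited = arr[0:N:2] + arr[1:N:2][::-1]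
--     return max(abs(x - y) for x, y in zip(visited, visited[1:] + visited[:1]))
-- ===== Notes on version B (the rewrite author's own statement) =====
-- stated objective: simpler
-- what changed: Replaces A's index-counter scatter loop (writing alternately to the front and the negative back of a preallocated array) with a direct slice construction of the zigzag (even sorted positions ++ reversed odd positions), and replaces A's seed-plus-loop maximum with a single circular max over zipped adjacent pairs.
import Mathlib
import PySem

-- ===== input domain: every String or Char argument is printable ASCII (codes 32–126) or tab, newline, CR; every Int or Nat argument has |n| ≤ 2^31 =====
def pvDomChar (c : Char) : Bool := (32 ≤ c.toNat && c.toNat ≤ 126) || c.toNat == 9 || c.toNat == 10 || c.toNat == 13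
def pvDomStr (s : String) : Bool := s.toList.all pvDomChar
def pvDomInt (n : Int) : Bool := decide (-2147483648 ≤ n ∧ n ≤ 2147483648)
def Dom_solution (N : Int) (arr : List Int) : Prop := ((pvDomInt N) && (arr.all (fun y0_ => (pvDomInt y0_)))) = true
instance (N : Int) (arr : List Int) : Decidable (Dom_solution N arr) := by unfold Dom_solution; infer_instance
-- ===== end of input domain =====

-- B replaces A's index-counter scatter loop by a slice-built zigzag and a single circular
-- max pass over zipped adjacent pairs (objective: simpler). Both A and B sort `arr` in
-- place; the theorems below are about the RETURN value only (both mutate alike).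

-- ===== PORT A =====
def solution (N : Int) (arr : List Int) : Int :=
  let s := PySem.List.sorted arr (fun x => x) false
  let st := (PySem.List.pyRange 0 N 1).foldl
    (fun (st : List Int × Int) i =>
      if PySem.Int.mod i 2 = 0 then
        (PySem.List.pySetD st.1 st.2 (PySem.List.pyGetD s i 0), st.2 + 1)
      else
        (PySem.List.pySetD st.1 (-st.2) (PySem.List.pyGetD s i 0), st.2))
    (PySem.List.pyRepeat [(0 : Int)] N, (0 : Int))
  let visited := st.1
  let answer := |PySem.List.pyGetD visited 0 0 - PySem.List.pyGetD visited (-1) 0|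
  (PySem.List.pyRange 0 (N - 1) 1).foldl
    (fun a i => max |PySem.List.pyGetD visited i 0 - PySem.List.pyGetD visited (i + 1) 0| a)
    answer

-- ===== PORT B =====
def solution_alt (N : Int) (arr : List Int) : Int :=
  let s := PySem.List.sorted arr (fun x => x) false
  let evn := (PySem.List.slice? s (some 0) (some N) 2).getD []   -- arr[0:N:2] (step 2 ≠ 0, never none)
  let odd := (PySem.List.slice? s (some 1) (some N) 2).getD []   -- arr[1:N:2]
  let visited := evn ++ odd.reverse                              -- [::-1] is reverse
  let diffs := (visited.zip (visited.tail ++ visited.take 1)).map (fun p => |p.1 - p.2|)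
  -- max(): none = ValueError on an empty sequence (only when N ≤ 0), excluded by Pre_
  (PySem.List.max? diffs (fun y => y)).getD 0

-- ===== PRECONDITION & SPEC =====
-- exactly the inputs on which A returns: otherwise A hits an IndexError
-- (visited[0] on an empty visited for N ≤ 0, or arr[i] for N > len(arr))
def Pre_solution (N : Int) (arr : List Int) : Prop := 1 ≤ N ∧ N ≤ arr.length
instance (N : Int) (arr : List Int) : Decidable (Pre_solution N arr) := by unfold Pre_solution; infer_instance
def pvWitness_solution : Int × List Int := (3, [5, 1, 4])

def Spec_solution (N : Int) (arr : List Int) (out : Int) : Prop := out = solution_alt N arr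
instance (N : Int) (arr : List Int) (out : Int) : Decidable (Spec_solution N arr out) := by unfold Spec_solution; infer_instance

-- ===== CLAIM (what is proved, stated in full; the proofs are below) =====
def Claim_equal_solution : Prop := ∀ (N : Int) (arr : List Int), Dom_solution N arr → Pre_solution N arr → Spec_solution N arr (solution N arr)

-- ===== LEMMAS AND PROOFS =====

-- the even- and odd-indexed elements of s below position i
def pvEv (s : List Int) (i : Nat) : List Int := (List.range ((i + 1) / 2)).map (fun k => s.getD (2 * k) 0)
def pvOd (s : List Int) (i : Nat) : List Int := (List.range (i / 2)).map (fun k => s.getD (2 * k + 1) 0)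

-- seed-commutation for a running max
theorem pv_foldl_max_comm (l : List Int) : ∀ (a b : Int), l.foldl max (max a b) = max a (l.foldl max b) := by
  induction l with
  | nil => intro a b; simp
  | cons x t ih =>
      intro a b
      simp only [List.foldl_cons]
      rw [max_assoc, ih]

theorem pvSetD_neg (xs : List Int) (k : Nat) (v : Int) (h1 : 0 < k) (h2 : k ≤ xs.length) :
    PySem.List.pySetD xs (-(k : Int)) v = xs.set (xs.length - k) v := by
  have hk2 : -(xs.length : Int) ≤ -(k:Int) := by omega
  have hk0 : k ≠ 0 := by omega
  simp [PySem.List.pySetD, PySem.List.pySet?, PySem.List.pyIdx?, hk2, hk0]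

theorem pv_loopA (s : List Int) (n : Nat) (i : Nat) (hi : i ≤ n) :
    (PySem.List.pyRange 0 (i : Int) 1).foldl
      (fun (st : List Int × Int) j =>
        if PySem.Int.mod j 2 = 0 then
          (PySem.List.pySetD st.1 st.2 (PySem.List.pyGetD s j 0), st.2 + 1)
        else
          (PySem.List.pySetD st.1 (-st.2) (PySem.List.pyGetD s j 0), st.2))
      (List.replicate n 0, (0 : Int))
    = (pvEv s i ++ List.replicate (n - i) 0 ++ (pvOd s i).reverse, (((i + 1) / 2 : Nat) : Int)) := by
  induction i with
  | zero => simp [PySem.List.pyRange_one_eq_nil, pvEv, pvOd]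
  | succ i ih =>
      have hii : i ≤ n := by omega
      have hcast : ((i:Int) + 1) = ((i+1 : Nat) : Int) := by push_cast; ring
      rw [← hcast, PySem.List.pyRange_one_succ_right (by omega : (0:Int) ≤ (i:Int)),
        List.foldl_append, ih hii]
      have hmod : PySem.Int.mod (i:Int) 2 = ((i % 2 : Nat) : Int) := by
        exact_mod_cast PySem.Int.mod_natCast i 2
      simp only [List.foldl_cons, List.foldl_nil]
      rcases Nat.even_or_odd i with he | ho
      · -- i even
        have h2 : i % 2 = 0 := Nat.even_iff.mp he
        have hbranch : PySem.Int.mod (i:Int) 2 = 0 := by rw [hmod, h2]; simp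
        rw [if_pos hbranch]
        have hget : PySem.List.pyGetD s (i:Int) 0 = s.getD i 0 := by
          simp [PySem.List.pyGetD_natCast]
        have hlen : (pvEv s i).length = (i+1)/2 := by simp [pvEv]
        have hrepl : List.replicate (n - i) (0:Int) = 0 :: List.replicate (n - i - 1) 0 := by
          rw [← List.replicate_succ]; congr 1; omega
        have hset : (pvEv s i ++ List.replicate (n - i) (0:Int) ++ (pvOd s i).reverse).set ((i+1)/2) (s.getD i 0)
            = pvEv s (i+1) ++ List.replicate (n - (i+1)) 0 ++ (pvOd s (i+1)).reverse := by
          rw [List.append_assoc, List.set_append, if_neg (by omega), hlen]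
          rw [Nat.sub_self, hrepl]
          have hev : pvEv s (i+1) = pvEv s i ++ [s.getD i 0] := by
            have e1 : ((i+1)+1)/2 = (i+1)/2 + 1 := by omega
            have e2 : 2 * ((i+1)/2) = i := by omega
            simp [pvEv, e1, List.range_succ, e2]
          have hod : pvOd s (i+1) = pvOd s i := by
            have : (i+1)/2 = i/2 := by omega
            simp [pvOd, this]
          have hz : n - (i+1) = n - i - 1 := by omega
          simp [hev, hod, hz, List.set_cons_zero]
        simp only [PySem.List.pySetD_natCast, hget]
        rw [hset]
        have : (i+1)/2 + 1 = ((i+1)+1)/2 := by omega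
        congr 1
        exact_mod_cast congrArg (fun m : Nat => (m : Int)) this
      · -- i odd
        have h2 : i % 2 = 1 := Nat.odd_iff.mp ho
        have hbranch : ¬ (PySem.Int.mod (i:Int) 2 = 0) := by rw [hmod, h2]; simp
        rw [if_neg hbranch]
        have hget : PySem.List.pyGetD s (i:Int) 0 = s.getD i 0 := by
          simp [PySem.List.pyGetD_natCast]
        set V := pvEv s i ++ List.replicate (n - i) (0:Int) ++ (pvOd s i).reverse with hV
        have hVlen : V.length = n := by
          simp [hV, pvEv, pvOd]
          omega
        have hk1 : 0 < (i+1)/2 := by omega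
        have hk2 : (i+1)/2 ≤ V.length := by omega
        have hsetneg : PySem.List.pySetD V (-(((i+1)/2 : Nat) : Int)) (s.getD i 0)
            = V.set (V.length - (i+1)/2) (s.getD i 0) := pvSetD_neg V _ _ hk1 hk2
        have hrepl : List.replicate (n - i) (0:Int) = List.replicate (n - i - 1) 0 ++ [0] := by
          rw [← List.replicate_succ']; congr 1; omega
        have hidx : V.length - (i+1)/2 = (pvEv s i ++ List.replicate (n - i - 1) (0:Int)).length := by
          simp [hVlen, pvEv]
          omega
        have hod : pvOd s (i+1) = pvOd s i ++ [s.getD i 0] := by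
          have e1 : (i+1)/2 = i/2 + 1 := by omega
          have e2 : 2 * (i/2) + 1 = i := by omega
          simp [pvOd, e1, List.range_succ, e2]
        have hev : pvEv s (i+1) = pvEv s i := by
          have : ((i+1)+1)/2 = (i+1)/2 := by omega
          simp [pvEv, this]
        have hset : V.set (V.length - (i+1)/2) (s.getD i 0)
            = pvEv s (i+1) ++ List.replicate (n - (i+1)) 0 ++ (pvOd s (i+1)).reverse := by
          rw [hidx, hV, hrepl]
          rw [show pvEv s i ++ (List.replicate (n-i-1) (0:Int) ++ [0]) ++ (pvOd s i).reverse
              = (pvEv s i ++ List.replicate (n-i-1) (0:Int)) ++ (0 :: (pvOd s i).reverse) by simp]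
          rw [List.set_append, if_neg (by omega), Nat.sub_self, List.set_cons_zero]
          have hz : n - (i+1) = n - i - 1 := by omega
          simp [hev, hod, hz]
        rw [Prod.mk.injEq]
        constructor
        · rw [hget, hsetneg, hset]
        · have : (i+1)/2 = ((i+1)+1)/2 := by omega
          exact_mod_cast congrArg (fun m : Nat => (m : Int)) this

theorem pv_slice_even (s : List Int) (N : Int) (h1 : 1 ≤ N) (h2 : N ≤ s.length) :
    PySem.List.slice? s (some 0) (some N) 2 = some (pvEv s N.toNat) := by
  have hs : ¬ ((2:Int) = 0) := by omega
  have hN0 : ¬ (N < 0) := by omega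
  have hmin : min N (s.length : Int) = N := by omega
  simp only [PySem.List.slice?, PySem.List.sliceIndices, if_neg hs]
  norm_num [hN0, hmin]
  rw [if_pos (by omega : (0:Int) < N)]
  have hcnt : ((N + 2 - 1) / 2).toNat = (N.toNat + 1) / 2 := by omega
  rw [hcnt]
  rw [List.filterMap_congr (g := fun k => some (s.getD (2 * k) 0)) ?_]
  · simp [pvEv]
  · intro k hk
    simp only [List.mem_range] at hk
    have hlt : 2 * k < s.length := by omega
    have : ((2:Int) * (k:Int)).toNat = 2 * k := by omega
    rw [this, List.getElem?_eq_getElem hlt]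
    simp [List.getD_eq_getElem?_getD, List.getElem?_eq_getElem hlt]

theorem pv_slice_odd (s : List Int) (N : Int) (h1 : 1 ≤ N) (h2 : N ≤ s.length) :
    PySem.List.slice? s (some 1) (some N) 2 = some (pvOd s N.toNat) := by
  have hs : ¬ ((2:Int) = 0) := by omega
  have hN0 : ¬ (N < 0) := by omega
  have hmin : min N (s.length : Int) = N := by omega
  have hmin1 : min (1:Int) (s.length : Int) = 1 := by omega
  simp only [PySem.List.slice?, PySem.List.sliceIndices, if_neg hs]
  norm_num [hN0, hmin, hmin1]
  have hcnt : (if (1:Int) < N then ((N - 1 + 2 - 1) / 2).toNat else 0) = N.toNat / 2 := by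
    split_ifs <;> omega
  rw [hcnt]
  rw [List.filterMap_congr (g := fun k => some (s.getD (2 * k + 1) 0)) ?_]
  · simp [pvOd]
  · intro k hk
    simp only [List.mem_range] at hk
    have hlt : 2 * k + 1 < s.length := by omega
    have : ((1:Int) + 2 * (k:Int)).toNat = 2 * k + 1 := by omega
    rw [this, List.getElem?_eq_getElem hlt]
    simp [List.getD_eq_getElem?_getD, List.getElem?_eq_getElem hlt]

theorem pv_diffs (V : List Int) (hV : V ≠ []) :
    (V.zip (V.tail ++ V.take 1)).map (fun p => |p.1 - p.2|)
    = (List.range (V.length - 1)).map (fun k => |V.getD k 0 - V.getD (k + 1) 0|)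
      ++ [|V.getD (V.length - 1) 0 - V.getD 0 0|] := by
  have hlen : 1 ≤ V.length := List.length_pos_iff.mpr hV
  apply List.ext_getElem
  · simp
    omega
  · intro i h1 h2
    have hiV : i < V.length := by
      simp at h1
      omega
    have htt : (V.tail ++ V.take 1).length = V.length := by
      simp
      omega
    simp only [List.getElem_map, List.getElem_zip, List.getElem_append]
    by_cases hc : i < V.length - 1
    · rw [dif_pos (by simpa using hc), dif_pos (by simpa using hc)]
      rw [List.getElem_range]
      rw [List.getD_eq_getElem _ _ hiV, List.getD_eq_getElem _ _ (by omega : i + 1 < V.length)]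
      congr 1
      rw [List.getElem_tail]
    · have hieq : i = V.length - 1 := by omega
      subst hieq
      rw [dif_neg (by simpa using hc), dif_neg (by simpa using hc)]
      have ht1 : (List.take 1 V) = [V[0]] := by
        cases V with
        | nil => simp at hV
        | cons x t => simp
      simp only [List.length_tail, List.length_map, List.length_range, ht1]
      have hz : V.length - 1 - (V.length - 1) = 0 := by omega
      simp only [hz, List.getElem_cons_zero]
      rw [List.getD_eq_getElem _ _ (by omega : V.length - 1 < V.length),
          List.getD_eq_getElem _ _ (by omega : 0 < V.length)]
      rfl



theorem pv_main (N : Int) (arr : List Int) (h1 : 1 ≤ N) (h2 : N ≤ arr.length) :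
    solution N arr = solution_alt N arr := by
  unfold solution solution_alt
  set s := PySem.List.sorted arr (fun x => x) false with hs
  have hsl : s.length = arr.length := PySem.List.length_sorted arr _ _
  set n := N.toNat with hn
  have hN : (n : Int) = N := by omega
  have h1n : 1 ≤ n := by omega
  have h2n : n ≤ s.length := by omega
  rw [PySem.List.pyRepeat_singleton, ← hN]
  simp only [Int.toNat_natCast]
  rw [pv_loopA s n n le_rfl]
  rw [pv_slice_even s ((n : Nat) : Int) (by omega) (by omega),
      pv_slice_odd s ((n : Nat) : Int) (by omega) (by omega)]
  simp only [Option.getD_some, Nat.sub_self, List.replicate_zero, List.append_nil,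
    Int.toNat_natCast]
  set V := pvEv s n ++ (pvOd s n).reverse with hV
  have hVne : V ≠ [] := by
    intro hc
    rw [hV] at hc
    have hevnil := (List.append_eq_nil_iff.mp hc).1
    have : (pvEv s n).length = 0 := by rw [hevnil]; rfl
    simp [pvEv] at this
    omega
  have hVlen : V.length = n := by
    simp [hV, pvEv, pvOd]
    omega
  rw [pv_diffs V hVne]
  set ds := (List.range (V.length - 1)).map (fun k => |V.getD k 0 - V.getD (k + 1) 0|) with hds
  set w := |V.getD (V.length - 1) 0 - V.getD 0 0| with hw
  have hseed : PySem.List.pyGetD V 0 0 = V.getD 0 0 := PySem.List.pyGetD_zero V 0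
  have hlast : PySem.List.pyGetD V (-1) 0 = V.getD (V.length - 1) 0 := by
    rw [show (-1 : Int) = -((1:Nat):Int) by norm_num,
        PySem.List.pyGetD_neg_natCast V 1 0 (by omega) (by omega),
        List.getD_eq_getElem _ _ (by omega : V.length - 1 < V.length)]
  rw [hseed, hlast]
  have hN1 : ((n - 1 : Nat) : Int) = (n : Int) - 1 := by omega
  have hloop : (PySem.List.pyRange 0 ((n : Int) - 1) 1).foldl
      (fun a i => max |PySem.List.pyGetD V i 0 - PySem.List.pyGetD V (i + 1) 0| a)
      |V.getD 0 0 - V.getD (V.length - 1) 0|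
      = ds.foldl max |V.getD 0 0 - V.getD (V.length - 1) 0| := by
    rw [← hN1, PySem.List.pyRange_one, hds, hVlen]
    rw [List.foldl_map, List.foldl_map]
    apply PySem.List.foldl_congr_mem
    intro a k hk
    simp only [List.mem_range] at hk
    have c1 : PySem.List.pyGetD V (0 + (k:Int)) 0 = V.getD k 0 := by
      rw [show (0 + (k:Int)) = ((k : Nat) : Int) by ring, PySem.List.pyGetD_natCast]
    have c2 : PySem.List.pyGetD V (0 + (k:Int) + 1) 0 = V.getD (k+1) 0 := by
      rw [show (0 + (k:Int) + 1) = ((k+1 : Nat) : Int) by push_cast; ring, PySem.List.pyGetD_natCast]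
    rw [c1, c2, max_comm]
  rw [hloop]
  have habs : |V.getD 0 0 - V.getD (V.length - 1) 0| = w := by rw [hw, abs_sub_comm]
  rw [habs]
  rcases hds2 : ds with _ | ⟨d0, rest⟩
  · simp [PySem.List.max?_id_cons]
  · rw [List.cons_append, PySem.List.max?_id_cons, Option.getD_some, List.foldl_append]
    simp only [List.foldl_cons]
    rw [pv_foldl_max_comm, max_comm]
    simp

-- ===== VERDICT (by name: the statement is the Claim_ definition above) =====
theorem solution_spec : Claim_equal_solution := by
  intro N arr _ hpre
  unfold Spec_solution
  exact pv_main N arr hpre.1 hpre.2
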